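-- pv_equiv track=rewrite | github.com/csrividhya/Data-Mining | hw4/general.py | find_cluster_data
-- ===== SOURCE A (Python) =====
-- def find_cluster_data(data, cluster, k):
--     c = []  # array of each cluster's data points' indices
--     for i in range(0, k):
--         cluster_data = []
--         sse = 0.0
--         for j in range(0, len(data)):
--             if cluster[j] == i:
--                 cluster_data.append(data[j])
--         c.append(cluster_data)
--     return c
-- ===== SOURCE B (Python) =====
-- def find_cluster_data(data, cluster, k):
--     groups = {}
--     for x, c in zip(data, cluster):
--         groups.setdefault(c, []).append(x)
--     return [groups.get(i, []) for i in range(k)]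
-- ===== Notes on version B (the rewrite author's own statement) =====
-- stated objective: faster
-- what changed: Instead of scanning all of data once per cluster index (k passes with an equality test), B makes a single pass over zip(data, cluster) bucketing points into a dict of lists, then reads the k buckets out in order.
import Mathlib
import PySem

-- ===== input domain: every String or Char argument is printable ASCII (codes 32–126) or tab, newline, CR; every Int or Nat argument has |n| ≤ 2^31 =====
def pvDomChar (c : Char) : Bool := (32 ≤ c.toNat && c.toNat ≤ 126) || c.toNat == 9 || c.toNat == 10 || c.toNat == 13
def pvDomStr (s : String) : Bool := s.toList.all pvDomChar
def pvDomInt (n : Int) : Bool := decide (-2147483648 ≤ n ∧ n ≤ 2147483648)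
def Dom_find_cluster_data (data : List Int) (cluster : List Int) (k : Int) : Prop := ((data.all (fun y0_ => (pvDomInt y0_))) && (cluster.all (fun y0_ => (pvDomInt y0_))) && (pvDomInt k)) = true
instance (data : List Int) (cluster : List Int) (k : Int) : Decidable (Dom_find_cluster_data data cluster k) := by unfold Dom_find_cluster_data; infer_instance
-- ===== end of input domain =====

-- B replaces A's k scans of data (one per cluster index) by a single dict-grouping pass
-- over zip(data, cluster) followed by k lookups (objective: faster, asymptotic).

-- ===== PORT A =====
def find_cluster_data (data : List Int) (cluster : List Int) (k : Int) : List (List Int) :=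
  (PySem.List.pyRange 0 k 1).foldl (fun c i =>
    c ++ [ (PySem.List.pyRange 0 (data.length : Int) 1).foldl (fun cd j =>
             if PySem.List.pyGetD cluster j 0 = i then
               cd ++ [PySem.List.pyGetD data j 0]
             else cd) [] ]) []

-- ===== PORT B =====
-- groups.setdefault(c, []).append(x) is d[c] = d.get(c, []) + [x], i.e. Dict.modify
def find_cluster_data_alt (data : List Int) (cluster : List Int) (k : Int) : List (List Int) :=
  let groups := (data.zip cluster).foldl
    (fun d p => d.modify p.2 [] (· ++ [p.1])) (PySem.Dict.empty)
  (PySem.List.pyRange 0 k 1).map (fun i => groups.getD i [])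

-- ===== PRECONDITION & SPEC =====
-- Pre_ excludes exactly the inputs where A raises IndexError: k > 0 with cluster shorter than data.
def Pre_find_cluster_data (data : List Int) (cluster : List Int) (k : Int) : Prop :=
  k ≤ 0 ∨ data.length ≤ cluster.length
instance (data : List Int) (cluster : List Int) (k : Int) : Decidable (Pre_find_cluster_data data cluster k) := by unfold Pre_find_cluster_data; infer_instance
def pvWitness_find_cluster_data : List Int × List Int × Int := ([5, 7, 5], [1, 0, 1], 2)

def Spec_find_cluster_data (data : List Int) (cluster : List Int) (k : Int) (out : List (List Int)) : Prop := out = find_cluster_data_alt data cluster k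
instance (data : List Int) (cluster : List Int) (k : Int) (out : List (List Int)) : Decidable (Spec_find_cluster_data data cluster k out) := by unfold Spec_find_cluster_data; infer_instance

-- ===== CLAIM (what is proved, stated in full; the proofs are below) =====
def Claim_equal_find_cluster_data : Prop := ∀ (data : List Int) (cluster : List Int) (k : Int), Dom_find_cluster_data data cluster k → Pre_find_cluster_data data cluster k → Spec_find_cluster_data data cluster k (find_cluster_data data cluster k)

-- ===== LEMMAS AND PROOFS =====

-- A's outer loop is a map over range(k).
theorem find_cluster_data_eq_map (data cluster : List Int) (k : Int) :
    find_cluster_data data cluster k =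
      (PySem.List.pyRange 0 k 1).map (fun i =>
        (PySem.List.pyRange 0 (data.length : Int) 1).foldl (fun cd j =>
          if PySem.List.pyGetD cluster j 0 = i then cd ++ [PySem.List.pyGetD data j 0]
          else cd) []) := by
  unfold find_cluster_data
  rw [PySem.List.foldl_append_singleton_eq_map]
  simp

-- A's inner scan over indices equals the filtered zip (when cluster covers data).
theorem inner_eq_filter (data cluster : List Int) (h : data.length ≤ cluster.length) (i : Int) :
    (PySem.List.pyRange 0 (data.length : Int) 1).foldl (fun cd j =>
        if PySem.List.pyGetD cluster j 0 = i then cd ++ [PySem.List.pyGetD data j 0]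
        else cd) [] =
      ((data.zip cluster).filter (fun p => p.2 == i)).map (·.1) := by
  have hlen : ((data.zip cluster).length : Int) = (data.length : Int) := by
    simp [List.length_zip]; omega
  rw [← hlen]
  rw [PySem.List.foldl_congr_mem _ _
      (fun cd j =>
        if (PySem.List.pyGetD (data.zip cluster) j ((0 : Int), (0 : Int))).2 = i then
          cd ++ [(PySem.List.pyGetD (data.zip cluster) j ((0 : Int), (0 : Int))).1]
        else cd) _ ?_]
  · rw [PySem.List.foldl_pyRange_zero_pyGetD' (data.zip cluster) ((0 : Int), (0 : Int))
        (fun cd p => if p.2 = i then cd ++ [p.1] else cd) []]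
    rw [PySem.List.foldl_append_ite (p := fun p : Int × Int => p.2 = i)
        (f := fun p : Int × Int => p.1)]
    simp only [List.nil_append]
    congr 1
  · intro acc j hj
    rw [PySem.List.mem_pyRange_one] at hj
    have hj2 : j < (data.length : Int) := by omega
    beta_reduce
    rw [PySem.List.pyGetD_eq_getElem cluster (0 : Int) hj.1 (by omega),
        PySem.List.pyGetD_eq_getElem data (0 : Int) hj.1 (by omega),
        PySem.List.pyGetD_eq_getElem (data.zip cluster) ((0 : Int), (0 : Int)) hj.1
          (by rw [List.length_zip]; push_cast; omega)]
    simp [List.getElem_zip]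

-- B's dict bucket for i is the filtered zip.
theorem bucket_eq_filter (data cluster : List Int) (i : Int) :
    ((data.zip cluster).foldl (fun d p => d.modify p.2 [] (· ++ [p.1]))
        (PySem.Dict.empty)).getD i [] =
      ((data.zip cluster).filter (fun p => p.2 == i)).map (·.1) := by
  have hswap : data.zip cluster = (cluster.zip data).map Prod.swap := by
    rw [List.zip_swap]
  rw [hswap, List.foldl_map]
  simp only [Prod.snd_swap, Prod.fst_swap]
  rw [PySem.Dict.getD_foldl_modify_append, PySem.Dict.getD_empty, List.nil_append]
  generalize cluster.zip data = L
  induction L with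
  | nil => rfl
  | cons a t ih => by_cases h : a.1 = i <;> simp [h, ih]

-- ===== VERDICT (by name: the statement is the Claim_ definition above) =====
theorem find_cluster_data_spec : Claim_equal_find_cluster_data := by
  intro data cluster k _ hpre
  unfold Spec_find_cluster_data find_cluster_data_alt
  rw [find_cluster_data_eq_map]
  rcases hpre with hk | hlen
  · rw [PySem.List.pyRange_one_eq_nil hk]
    simp
  · apply List.map_congr_left
    intro i _
    rw [inner_eq_filter data cluster hlen i, bucket_eq_filter]
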